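-- pv_equiv track=rewrite | github.com/Franka-Beyer/HSprakt | MakeVectors.py | patternize_and_master_list
-- ===== SOURCE A (Python) =====
-- from collections import Counter
-- from typing import List, Dict, Any, Tuple
--
-- def celex_lemmatize(liste:List[str], dictionary:Dict[str, str]) -> List[str]:
--     """
--     Nimmt Liste von einzelnen CQP-Ergebnissen (je eine Zeile pro Listenelement) an. Lemmatisiert diese zeilenwiese mit Hilfe eines auf CELEX basierenden Wortform-Lemma-Dictionary und gibt die resultierende Liste zurück.
--
--     :param liste: zeilenweise Liste von CQP-Ergebnissen (bzw. je einem Ergebnis)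
--     :param dictionary: Wortform-Lemma-Dictionary, hier basierend auf CELEX
--     """
--     hl = []
--     for e in liste:
--         hl2 = []
--         for x in e.split():
--             if x in dictionary.keys():
--                 x = dictionary[x]
--             hl2.append(x)
--         hl.append(" ".join(hl2))
--     return hl
--
-- def x_y_out(musterliste:List[str], wordliste:List[str]) -> List[str]:
--     """
--     Nimmt Liste lemmatisierter CQP-Ergebniszeilen und zugehöriges Wortpaar als Liste an. Ersetzt die beiden Wörter des gesuchten Wortpaares durch X bzw. Y.
--
--     :param musterliste: Liste lemmatisierter CQP-Ergebniszeilen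
--     :param wordliste: zugehöriges Wortpaar als Liste
--     """
--     hl = []
--     for e in musterliste:
--         hl2 = []
--         for w in e.split():
--             if w == wordliste[0]:
--                 w = 'X'
--             if w == wordliste[1]:
--                 w = 'Y'
--             hl2.append(w)
--         hl.append(" ".join(hl2))
--     return hl
--
-- def vary(remain:List[str], data:List[str]) -> None:
--     """
--     Generiert aus einer Liste sämtliche möglichen Patterns, indem die einzelnen Elemente der Reihe nach durch * ersetzt werden.
--     Die Strings 'X' und 'Y' bleiben dabei erhalten.
--
--     :param remain: Liste mit noch zu verarbeitenden Elementen
--     :param data: Anfang des Resultats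
--     """
--     if not remain:
--         # keine noch zu verarbeitenden Elemente: fertig
--         yield data
--         return
--     x,*remain = remain  # erstes Element isolieren
--     if x not in ("X", "Y"):
--         yield from vary(remain, data+("*",)) # Rest mit '*' statt des Elements generieren
--     yield from vary(remain, data+(x,)) # Rest mit diesem konkreten Element generieren
--
-- def patternize(musterliste:List[str]) -> List[str]:
--     """
--     Produziert für eine Liste von Mustern sämtliche möglichen Patterns, indem aus jedem Muster via 'vary()' eine Liste von Patterns generiert wird.
--
--     :param musterliste: Liste lemmatisierter CQP-Ergebniszeilen, in denen das Wortpaar durch X und Y ersetzt wurde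
--     """
--     res = []
--     for line in musterliste:
--         for pattern in vary(line.split(" "),()):
--             res.append(" ".join(pattern))
--     return res
--
-- def patternize_and_master_list(patterndict:Dict[str, List[str]], formlemma:Dict[str, str]) -> Tuple[Dict[str, Any], List[str]]:
--     """
--     Nimmt Wortpaar-CQP-Ergebnisse-Dictionary und Wortform-Lemma-Dictionary entgegen. Lässt CQP-Ergebnisse lemmatisieren, das Wortpaar durch X und Y ersetzen, sämtliche möglichen Patterns für die einzelenen Wortpaare erstellen und diese zählen. Gibt Wortpaar-Counter(Patterns)-Dictionary und Liste aller produzierten Patterns zurück.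
--
--     :param patterndict: Wortpaar-CQP-Ergebnisse-Dictionary
--     :param formlemma: Wortform-Lemma-Dictionary
--     """
--     masterpatternlist = []
--     for pair in patterndict.keys():
--         patterndict[pair] = celex_lemmatize(patterndict[pair], formlemma)
--         patterndict[pair] = x_y_out(patterndict[pair], pair.split(":"))
--         p = patternize(patterndict[pair])
--         patterndict[pair] = Counter(p)
--         masterpatternlist.extend(p)
--     return patterndict, [x for x in masterpatternlist if x!='']
-- ===== SOURCE B (Python) =====
-- from collections import Counter
-- from itertools import product
--
-- def patternize_and_master_list(patterndict, formlemma):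
--     """Lemmatize each line, substitute the word pair by X/Y, then generate every
--     wildcard pattern by taking the cartesian product of per-token choices
--     ('*' or the token; X and Y are kept as-is) and count them per pair."""
--     masterpatternlist = []
--     for pair in patterndict:
--         parts = pair.split(":")
--         lemmatized = [" ".join(formlemma.get(t, t) for t in line.split())
--                       for line in patterndict[pair]]
--         substituted = []
--         for line in lemmatized:
--             toks = ['X' if w == parts[0] else w for w in line.split()]
--             toks = ['Y' if w == parts[1] else w for w in toks]
--             substituted.append(" ".join(toks))
--         patterns = []
--         for line in substituted:
--             choices = [(t,) if t in ('X', 'Y') else ('*', t) for t in line.split(" ")]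
--             patterns.extend(" ".join(p) for p in product(*choices))
--         patterndict[pair] = Counter(patterns)
--         masterpatternlist.extend(patterns)
--     return patterndict, [x for x in masterpatternlist if x != '']
-- ===== Notes on version B (the rewrite author's own statement) =====
-- stated objective: idiomatic
-- what changed: The recursive generator vary is replaced by an iterative cartesian product (itertools.product) over per-token choice tuples ('*', tok), and the explicit append/accumulator loops become list comprehensions; Pre_ only excludes inputs where A raises IndexError (a pair key without ':' whose lines still contain words).
import Mathlib
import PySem

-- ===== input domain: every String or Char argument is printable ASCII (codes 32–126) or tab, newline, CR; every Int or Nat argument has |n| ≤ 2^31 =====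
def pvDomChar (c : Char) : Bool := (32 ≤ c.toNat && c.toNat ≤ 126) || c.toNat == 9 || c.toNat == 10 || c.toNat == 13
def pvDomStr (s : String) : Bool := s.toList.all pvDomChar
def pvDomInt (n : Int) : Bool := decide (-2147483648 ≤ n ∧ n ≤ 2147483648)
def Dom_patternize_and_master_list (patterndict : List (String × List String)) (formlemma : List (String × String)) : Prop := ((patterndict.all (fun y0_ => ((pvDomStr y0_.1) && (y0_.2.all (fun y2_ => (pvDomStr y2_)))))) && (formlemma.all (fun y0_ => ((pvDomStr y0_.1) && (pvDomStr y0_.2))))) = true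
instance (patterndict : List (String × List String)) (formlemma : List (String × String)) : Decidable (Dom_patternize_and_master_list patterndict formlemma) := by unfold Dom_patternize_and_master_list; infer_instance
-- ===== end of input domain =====

-- B replaces the recursive pattern generator `vary` by an iterative cartesian
-- product over per-token choice lists and writes the per-line passes as list
-- comprehensions (objective: idiomatic; same asymptotic cost).
-- Python A mutates `patterndict` in place; the equivalence proved here is about
-- the returned value (B performs the same mutation in Python).


-- ===== PORT A =====

-- `celex_lemmatize` (dict lookup = first match on the association list)
def pvCelexLemmatize (liste : List String) (dictionary : List (String × String)) : List String :=
  liste.foldl (fun hl e =>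
    let hl2 := (PySem.Str.split₀ e).foldl (fun hl2 x =>
      hl2 ++ [match dictionary.lookup x with | some v => v | none => x]) []
    hl ++ [PySem.Str.join " " hl2]) []

-- `x_y_out`; `wordliste[0]`/`wordliste[1]` via pyGetD "" — the "" default is
-- unreachable under Pre_ (Python raises IndexError exactly there).
def pvXYOut (musterliste : List String) (wordliste : List String) : List String :=
  musterliste.foldl (fun hl e =>
    let hl2 := (PySem.Str.split₀ e).foldl (fun hl2 w =>
      let w1 := if w == PySem.List.pyGetD wordliste 0 "" then "X" else w
      let w2 := if w1 == PySem.List.pyGetD wordliste 1 "" then "Y" else w1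
      hl2 ++ [w2]) []
    hl ++ [PySem.Str.join " " hl2]) []

-- the recursive generator `vary` (results in yield order)
def pvVary : List String → List String → List (List String)
  | [], data => [data]
  | x :: remain, data =>
    (if x != "X" && x != "Y" then pvVary remain (data ++ ["*"]) else []) ++
      pvVary remain (data ++ [x])

-- `patternize`; line.split(" ") = split? with the nonempty separator " "
def pvPatternize (musterliste : List String) : List String :=
  musterliste.foldl (fun res line =>
    res ++ (pvVary ((PySem.Str.split? line " ").getD []) []).map
      (fun pattern => PySem.Str.join " " pattern)) []

def patternize_and_master_list (patterndict : List (String × List String)) (formlemma : List (String × String)) : (List (String × List (String × Int))) × List String :=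
  let r := patterndict.foldl
    (fun (acc : List (String × List (String × Int)) × List String) entry =>
      let lem := pvCelexLemmatize entry.2 formlemma
      let xy := pvXYOut lem ((PySem.Str.split? entry.1 ":").getD [])
      let p := pvPatternize xy
      (acc.1 ++ [(entry.1, (PySem.Dict.counter p).items)], acc.2 ++ p))
    ([], [])
  (r.1, r.2.filter (fun x => x != ""))

-- ===== PORT B =====

-- per-token choice tuple: ('*', tok) unless tok is 'X'/'Y'
def pvChoices (t : String) : List String := if t == "X" || t == "Y" then [t] else ["*", t]

-- itertools.product(*choices): first list slowest, ported as the usual fold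
def pvProduct : List (List String) → List (List String)
  | [] => [[]]
  | c :: cs => c.flatMap (fun x => (pvProduct cs).map (fun p => x :: p))

-- the X-then-Y substitution on one line, as in Source B's two comprehensions
def pvSubst (w0 w1 line : String) : String :=
  PySem.Str.join " "
    (((PySem.Str.split₀ line).map (fun w => if w == w0 then "X" else w)).map
      (fun w => if w == w1 then "Y" else w))

-- patterns of one substituted line: product of per-token choices, joined
def pvLinePatterns (line : String) : List String :=
  (pvProduct (((PySem.Str.split? line " ").getD []).map pvChoices)).map
    (fun p => PySem.Str.join " " p)

def patternize_and_master_list_alt (patterndict : List (String × List String)) (formlemma : List (String × String)) : (List (String × List (String × Int))) × List String :=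
  let r := patterndict.foldl
    (fun (acc : List (String × List (String × Int)) × List String) entry =>
      let parts := (PySem.Str.split? entry.1 ":").getD []
      let w0 := PySem.List.pyGetD parts 0 ""
      let w1 := PySem.List.pyGetD parts 1 ""
      let lemmatized := entry.2.map (fun line =>
        PySem.Str.join " " ((PySem.Str.split₀ line).map (fun t => ((formlemma.lookup t).getD t))))
      let substituted := lemmatized.map (pvSubst w0 w1)
      let pats := substituted.flatMap pvLinePatterns
      (acc.1 ++ [(entry.1, (PySem.Dict.counter pats).items)], acc.2 ++ pats))
    ([], [])
  (r.1, r.2.filter (fun x => x != ""))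

-- ===== PRECONDITION & SPEC =====
-- Pre_ excludes exactly the inputs where Python A raises IndexError: a key
-- without ':' whose line list contains a token whose lemma contains a word.
def Pre_patternize_and_master_list (patterndict : List (String × List String)) (formlemma : List (String × String)) : Prop :=
  ∀ e ∈ patterndict, PySem.Str.isIn ":" e.1 = true ∨
    ∀ line ∈ e.2, ∀ t ∈ PySem.Str.split₀ line, PySem.Str.split₀ ((formlemma.lookup t).getD t) = []
instance (patterndict : List (String × List String)) (formlemma : List (String × String)) : Decidable (Pre_patternize_and_master_list patterndict formlemma) := by unfold Pre_patternize_and_master_list; infer_instance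

def pvWitness_patternize_and_master_list : (List (String × List String)) × (List (String × String)) :=
  ([("a:b", ["a b", ""])], [("a", "x")])

def Spec_patternize_and_master_list (patterndict : List (String × List String)) (formlemma : List (String × String)) (out : (List (String × List (String × Int))) × List String) : Prop := out = patternize_and_master_list_alt patterndict formlemma
instance (patterndict : List (String × List String)) (formlemma : List (String × String)) (out : (List (String × List (String × Int))) × List String) : Decidable (Spec_patternize_and_master_list patterndict formlemma out) := by unfold Spec_patternize_and_master_list; infer_instance

-- ===== CLAIM (what is proved, stated in full; the proofs are below) =====
def Claim_equal_patternize_and_master_list : Prop := ∀ (patterndict : List (String × List String)) (formlemma : List (String × String)), Dom_patternize_and_master_list patterndict formlemma → Pre_patternize_and_master_list patterndict formlemma → Spec_patternize_and_master_list patterndict formlemma (patternize_and_master_list patterndict formlemma)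

-- ===== LEMMAS AND PROOFS =====

-- vary = cartesian product over the per-token choice lists, prefixed by data
theorem pv_vary_eq_product (ts : List String) : ∀ (data : List String),
    pvVary ts data = (pvProduct (ts.map pvChoices)).map (fun p => data ++ p) := by
  induction ts with
  | nil => intro data; simp [pvVary, pvProduct]
  | cons x r ih =>
    intro data
    by_cases hx : (x == "X" || x == "Y") = true
    · have hx2 : (x != "X" && x != "Y") = false := by
        cases hxx : x == "X" <;> cases hxy : x == "Y" <;> simp_all [bne]
      simp only [pvVary, hx2, Bool.false_eq_true, if_false, List.nil_append,
        List.map_cons, pvProduct, pvChoices, hx, if_true, List.flatMap_cons,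
        List.flatMap_nil, List.append_nil, List.map_map, ih]
      simp [Function.comp_def]
    · have hx2 : (x != "X" && x != "Y") = true := by
        cases hxx : x == "X" <;> cases hxy : x == "Y" <;> simp_all [bne]
      simp only [pvVary, hx2, if_true, List.map_cons, pvProduct, pvChoices, hx,
        Bool.false_eq_true, if_false, List.flatMap_cons, List.flatMap_nil,
        List.append_nil, List.map_map, List.map_append, ih]
      simp [Function.comp_def]

theorem patternize_and_master_list_spec : Claim_equal_patternize_and_master_list := by
  intro patterndict formlemma _ _
  unfold Spec_patternize_and_master_list
  unfold patternize_and_master_list patternize_and_master_list_alt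
  have hlookup : (fun x => (match formlemma.lookup x with | some v => v | none => x) : String → String)
      = fun x => (formlemma.lookup x).getD x := by
    funext x; cases formlemma.lookup x <;> rfl
  have hcelex : ∀ (lines : List String), pvCelexLemmatize lines formlemma
      = lines.map (fun line => PySem.Str.join " " ((PySem.Str.split₀ line).map (fun t => (formlemma.lookup t).getD t))) := by
    intro lines
    unfold pvCelexLemmatize
    simp only [PySem.List.foldl_append_singleton_eq_map, List.nil_append, hlookup]
  have hxy : ∀ (lst : List String) (wl : List String), pvXYOut lst wl
      = lst.map (pvSubst (PySem.List.pyGetD wl 0 "") (PySem.List.pyGetD wl 1 "")) := by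
    intro lst wl
    unfold pvXYOut pvSubst
    simp only [PySem.List.foldl_append_singleton_eq_map, List.nil_append, List.map_map]
    rfl
  have hpat : ∀ (ms : List String), pvPatternize ms = ms.flatMap pvLinePatterns := by
    intro ms
    unfold pvPatternize pvLinePatterns
    rw [PySem.List.foldl_append_eq_flatMap]
    simp only [List.nil_append]
    congr 1
    funext line
    rw [pv_vary_eq_product]
    simp
  have hfun : (fun (acc : List (String × List (String × Int)) × List String) (entry : String × List String) =>
      let lem := pvCelexLemmatize entry.2 formlemma
      let xy := pvXYOut lem ((PySem.Str.split? entry.1 ":").getD [])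
      let p := pvPatternize xy
      (acc.1 ++ [(entry.1, (PySem.Dict.counter p).items)], acc.2 ++ p))
      = (fun (acc : List (String × List (String × Int)) × List String) (entry : String × List String) =>
      let parts := (PySem.Str.split? entry.1 ":").getD []
      let w0 := PySem.List.pyGetD parts 0 ""
      let w1 := PySem.List.pyGetD parts 1 ""
      let lemmatized := entry.2.map (fun line =>
        PySem.Str.join " " ((PySem.Str.split₀ line).map (fun t => ((formlemma.lookup t).getD t))))
      let substituted := lemmatized.map (pvSubst w0 w1)
      let pats := substituted.flatMap pvLinePatterns
      (acc.1 ++ [(entry.1, (PySem.Dict.counter pats).items)], acc.2 ++ pats)) := by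
    funext acc entry
    simp only [hcelex, hxy, hpat]
  rw [hfun]
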